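-- pv_equiv track=rewrite | github.com/tenthweb/stv-election-decider | run.py | convert_ballot
-- ===== SOURCE A (Python) =====
-- candidates = {1: 'Bob',
--               2: 'Carol',
--               3: 'Alice',
--               4: 'Dave',
--               5: 'Eve',
--               6: 'Frank'}
--
-- def convert_ballot(ballot):
--     preference_list = []
--     current_search_number = 1
--     while current_search_number <= len(candidates):
--         for key in ballot:
--             if ballot[key] == current_search_number:
--                preference_list.append(key)
--         current_search_number+= 1
--     return preference_list
-- ===== SOURCE B (Python) =====
-- candidates = {1: 'Bob',
--               2: 'Carol',
--               3: 'Alice',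
--               4: 'Dave',
--               5: 'Eve',
--               6: 'Frank'}
--
-- def convert_ballot(ballot):
--     # One pass: bucket keys by their rank, then emit buckets for ranks 1..len(candidates).
--     buckets = {}
--     for key, rank in ballot.items():
--         buckets.setdefault(rank, []).append(key)
--     preference_list = []
--     for v in range(1, len(candidates) + 1):
--         preference_list.extend(buckets.get(v, ()))
--     return preference_list
-- ===== Notes on version B (the rewrite author's own statement) =====
-- stated objective: faster
-- what changed: Instead of rescanning the whole ballot once per rank 1..6 with a dict lookup per key, B makes a single pass bucketing keys by rank into a dict and then emits the buckets for ranks 1..6 in order.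
import Mathlib
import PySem

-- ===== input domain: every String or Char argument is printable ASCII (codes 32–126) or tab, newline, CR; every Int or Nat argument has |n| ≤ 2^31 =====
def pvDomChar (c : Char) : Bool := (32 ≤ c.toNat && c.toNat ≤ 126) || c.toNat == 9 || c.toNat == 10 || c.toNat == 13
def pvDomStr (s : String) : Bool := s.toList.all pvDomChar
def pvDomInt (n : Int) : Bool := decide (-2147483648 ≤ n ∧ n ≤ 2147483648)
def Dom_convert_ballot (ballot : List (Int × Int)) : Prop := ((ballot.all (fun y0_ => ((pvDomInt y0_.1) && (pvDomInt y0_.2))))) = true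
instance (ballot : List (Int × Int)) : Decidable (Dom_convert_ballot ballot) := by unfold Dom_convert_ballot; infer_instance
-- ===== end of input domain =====

-- B replaces A's six full-ballot scans (one per rank, with a dict lookup per key) by one
-- bucketing pass over the ballot followed by an ordered emit of ranks 1..6 (objective: faster).


-- ===== PORT A =====
-- while current_search_number <= len(candidates) (= 6): for key in ballot: if ballot[key] == v: append key
-- 'ballot[key]' is the dict lookup, ported as first-match lookup (PySem.Dict.getD on the same list).
def convert_ballot (ballot : List (Int × Int)) : List Int :=
  (PySem.List.pyRange 1 7).foldl
    (fun preference_list v =>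
      ballot.foldl
        (fun preference_list kv =>
          if (PySem.Dict.mk ballot).getD kv.1 0 == v then preference_list ++ [kv.1]
          else preference_list)
        preference_list)
    []

-- ===== PORT B =====
def convert_ballot_alt (ballot : List (Int × Int)) : List Int :=
  let buckets : PySem.Dict Int (List Int) :=
    ballot.foldl (fun d kv => d.modify kv.2 [] (fun l => l ++ [kv.1])) PySem.Dict.empty
  (PySem.List.pyRange 1 7).foldl
    (fun preference_list v => preference_list ++ buckets.getD v []) []

-- ===== PRECONDITION & SPEC =====
-- Pre_ requires distinct keys: the argument is a Python dict, whose keys are necessarily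
-- distinct; a duplicate-key association list represents no dict input A can receive.
def Pre_convert_ballot (ballot : List (Int × Int)) : Prop := (ballot.map Prod.fst).Nodup
instance (ballot : List (Int × Int)) : Decidable (Pre_convert_ballot ballot) := by unfold Pre_convert_ballot; infer_instance
def pvWitness_convert_ballot : (List (Int × Int)) := [(3, 2), (1, 1), (5, 2)]

def Spec_convert_ballot (ballot : List (Int × Int)) (out : List Int) : Prop := out = convert_ballot_alt ballot
instance (ballot : List (Int × Int)) (out : List Int) : Decidable (Spec_convert_ballot ballot out) := by unfold Spec_convert_ballot; infer_instance

-- ===== CLAIM (what is proved, stated in full; the proofs are below) =====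
def Claim_equal_convert_ballot : Prop := ∀ (ballot : List (Int × Int)), Dom_convert_ballot ballot → Pre_convert_ballot ballot → Spec_convert_ballot ballot (convert_ballot ballot)

-- ===== LEMMAS AND PROOFS =====

-- With distinct keys, A's dict lookup of a pair's key returns that pair's value.
theorem lookup_self (ballot : List (Int × Int)) (h : (ballot.map Prod.fst).Nodup)
    (kv : Int × Int) (hm : kv ∈ ballot) :
    (PySem.Dict.mk ballot).getD kv.1 0 = kv.2 := by
  induction ballot with
  | nil => cases hm
  | cons a l ih =>
    simp only [List.map_cons, List.nodup_cons] at h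
    rcases List.mem_cons.1 hm with rfl | hml
    · simp [PySem.Dict.getD, PySem.Dict.get?, List.find?]
    · have hne : (a.1 == kv.1) = false := by
        simp only [beq_eq_false_iff_ne, ne_eq]
        intro he
        exact h.1 (he ▸ List.mem_map_of_mem hml)
      have := ih h.2 hml
      simpa [PySem.Dict.getD, PySem.Dict.get?, List.find?, hne] using this

-- B's bucket for rank v holds exactly the keys whose pair carries value v, in ballot order.
theorem bucket_eq (ballot : List (Int × Int)) (v : Int) :
    (ballot.foldl (fun d kv => d.modify kv.2 [] (fun l => l ++ [kv.1]))
        (PySem.Dict.empty : PySem.Dict Int (List Int))).getD v []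
      = (ballot.filter (fun kv => kv.2 == v)).map Prod.fst := by
  have hmap : ballot.foldl (fun d kv => d.modify kv.2 [] (fun l => l ++ [kv.1]))
        (PySem.Dict.empty : PySem.Dict Int (List Int))
      = (ballot.map Prod.swap).foldl (fun d p => d.modify p.1 [] (fun l => l ++ [p.2]))
        PySem.Dict.empty := by
    rw [List.foldl_map]
    rfl
  rw [hmap, PySem.Dict.getD_foldl_modify_append]
  simp [List.filter_map, List.map_map, Function.comp_def, Prod.swap]

-- ===== VERDICT (by name: the statement is the Claim_ definition above) =====
theorem convert_ballot_spec : Claim_equal_convert_ballot := by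
  intro ballot _ hpre
  unfold Spec_convert_ballot convert_ballot convert_ballot_alt
  refine PySem.List.foldl_congr_mem _ _ _ _ ?_
  intro acc v _
  rw [bucket_eq]
  have hstep : ballot.foldl
      (fun preference_list kv =>
        if (PySem.Dict.mk ballot).getD kv.1 0 == v then preference_list ++ [kv.1]
        else preference_list) acc
    = ballot.foldl
      (fun preference_list kv =>
        if kv.2 == v then preference_list ++ [kv.1] else preference_list) acc := by
    refine PySem.List.foldl_congr_mem _ _ _ _ ?_
    intro a kv hkv
    rw [lookup_self ballot hpre kv hkv]
  rw [hstep, PySem.List.foldl_append_if]
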